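-- pv_equiv track=rewrite | github.com/neuroneural/pathtree | tools/pathtreetools.py | find_bcliques
-- ===== SOURCE A (Python) =====
-- from itertools import combinations
--
-- def find_bcliques(graph):
--     """
--     Identify all B-cliques in the graph.
--     A B-clique is any pair of non-empty subsets (V1, V2) such that
--     every v1 in V1 has at least one non-empty edge (directed or bidirected)
--     to every v2 in V2.
--     """
--     nodes = sorted(
--         set(graph.keys()) |
--         {nbr for nbrs in graph.values() for nbr in nbrs.keys()}
--     )
--     bcliques = []
--     # iterate over all non-empty subsets for parents (V1)
--     for r in range(1, len(nodes) + 1):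
--         for subset1 in combinations(nodes, r):
--             V1 = set(subset1)
--             # candidates for children: those v2 each v1 in V1 points to with a non-empty lag set
--             candidates = [
--                 v2 for v2 in nodes
--                 if all(
--                     v2 in graph.get(v1, {}) and any(graph[v1][v2].values())
--                     for v1 in V1
--                 )
--             ]
--             # now choose any non-empty subset of those candidates as V2
--             for s in range(1, len(candidates) + 1):
--                 for subset2 in combinations(candidates, s):
--                     V2 = set(subset2)
--                     bcliques.append((V1, V2))
--     return bcliques
-- ===== SOURCE B (Python) =====
-- def find_bcliques(graph):
--     """
--     Same result as the original, but via recursive include/exclude backtracking: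
--     V1 subsets are built one element at a time while threading the running
--     intersection of precomputed target sets (prefix intersections are shared
--     between subsets, and branches with an empty intersection are pruned);
--     V2 subsets are likewise enumerated by recursion instead of itertools.
--     """
--     nodes = sorted(set(graph) | {nbr for nbrs in graph.values() for nbr in nbrs})
--     T = {v: {w for w, lags in nbrs.items() if any(lags.values())}
--          for v, nbrs in graph.items()}
--     out = []
--
--     def pick(rem, need, chosen, V1):
--         # enumerate size-`need` subsets of rem (lex order), emit (V1, chosen+subset)
--         if need == 0:
--             out.append((set(V1), set(chosen)))
--             return
--         if len(rem) < need:
--             return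
--         pick(rem[1:], need - 1, chosen + [rem[0]], V1)   # include rem[0]
--         pick(rem[1:], need, chosen, V1)                  # exclude rem[0]
--
--     def emit(V1, inter):
--         cands = sorted(inter)
--         for s in range(1, len(cands) + 1):
--             pick(cands, s, [], V1)
--
--     def grow(rem, need, chosen, inter):
--         # extend chosen to a size-(len(chosen)+need) subset, intersection threaded
--         if need == 0:
--             emit(chosen, inter)
--             return
--         if len(rem) < need or not inter:
--             return
--         grow(rem[1:], need - 1, chosen + [rem[0]], inter & T.get(rem[0], set()))
--         grow(rem[1:], need, chosen, inter)
--
--     for r in range(1, len(nodes) + 1):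
--         grow(nodes, r, [], set(nodes))
--     return out
-- ===== Notes on version B (the rewrite author's own statement) =====
-- stated objective: alternative
-- what changed: B replaces itertools.combinations plus a per-subset full re-test of every (v1,v2) edge by recursive include/exclude backtracking that threads a running intersection of precomputed target sets, so prefix intersections are shared across subsets and branches with an empty intersection are pruned; V2 subsets are enumerated by the same recursion instead of itertools.
import Mathlib
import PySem

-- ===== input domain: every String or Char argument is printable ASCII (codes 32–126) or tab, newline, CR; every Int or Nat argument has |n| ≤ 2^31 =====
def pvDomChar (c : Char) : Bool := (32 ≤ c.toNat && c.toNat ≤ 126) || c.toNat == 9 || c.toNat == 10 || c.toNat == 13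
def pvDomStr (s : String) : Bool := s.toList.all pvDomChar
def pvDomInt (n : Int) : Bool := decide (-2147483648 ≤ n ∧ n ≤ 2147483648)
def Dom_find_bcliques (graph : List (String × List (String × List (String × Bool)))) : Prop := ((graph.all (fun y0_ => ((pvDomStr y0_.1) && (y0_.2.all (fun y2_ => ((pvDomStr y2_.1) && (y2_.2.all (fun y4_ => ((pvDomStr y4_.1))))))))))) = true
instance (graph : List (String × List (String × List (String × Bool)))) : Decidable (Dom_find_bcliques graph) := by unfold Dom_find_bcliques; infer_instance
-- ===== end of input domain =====

-- B replaces A's itertools enumeration with per-subset edge re-tests by recursive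
-- include/exclude backtracking that threads a running intersection of precomputed
-- target sets, pruning empty-intersection branches (objective: alternative).

-- ===== PORT A =====
-- the sorted node list both Python versions compute identically
def pvNodes (graph : List (String × List (String × List (String × Bool)))) : List String :=
  let g := PySem.Dict.ofList graph
  PySem.List.sorted
    (PySem.Set.union (PySem.Set.ofList g.keys)
      (g.values.flatMap (fun nbrs => (PySem.Dict.ofList nbrs).keys)))
    (fun x => x) false

-- 'v2 in graph.get(v1, {}) and any(graph[v1][v2].values())'
def pvEdgeTest (g : PySem.Dict String (List (String × List (String × Bool)))) (v1 v2 : String) : Bool :=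
  let nbrs := PySem.Dict.ofList (g.getD v1 [])
  nbrs.contains v2 && ((PySem.Dict.ofList (nbrs.getD v2 [])).values).any (fun b => b)

def find_bcliques (graph : List (String × List (String × List (String × Bool)))) : List (List String × List String) :=
  let g := PySem.Dict.ofList graph
  let nodes := pvNodes graph
  (List.range' 1 nodes.length 1).foldl (fun bcliques r =>
    (PySem.List.combinations nodes r).foldl (fun bcliques subset1 =>
      let V1 : PySem.Set String := PySem.Set.ofList subset1
      let candidates := nodes.filter (fun v2 => V1.all (fun v1 => pvEdgeTest g v1 v2))
      (List.range' 1 candidates.length 1).foldl (fun bcliques s =>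
        (PySem.List.combinations candidates s).foldl (fun bcliques subset2 =>
          bcliques ++ [(V1, PySem.Set.ofList subset2)]) bcliques) bcliques) bcliques) []

-- ===== PORT B =====
-- '{w for w, lags in nbrs.items() if any(lags.values())}'
def pvTargets (nbrs : List (String × List (String × Bool))) : PySem.Set String :=
  PySem.Set.ofList
    ((((PySem.Dict.ofList nbrs).items).filter
        (fun p => ((PySem.Dict.ofList p.2).values).any (fun b => b))).map Prod.fst)

-- 'T = {v: {...} for v, nbrs in graph.items()}'
def pvT (g : PySem.Dict String (List (String × List (String × Bool)))) : PySem.Dict String (PySem.Set String) :=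
  PySem.Dict.ofList (g.items.map (fun p => (p.1, pvTargets p.2)))

-- 'def pick(rem, need, chosen, V1): …' — recursive size-`need` subset enumeration
def pvPick (V1 : List String) (rem : List String) (need : Nat) (chosen : List String)
    (out : List (List String × List String)) : List (List String × List String) :=
  match need, rem with
  | 0, _ => out ++ [(PySem.Set.ofList V1, PySem.Set.ofList chosen)]
  | _ + 1, [] => out                                    -- 'if len(rem) < need: return'
  | n + 1, v :: rest =>
    if (v :: rest).length < n + 1 then out
    else pvPick V1 rest (n + 1) chosen (pvPick V1 rest n (chosen ++ [v]) out)

-- 'def emit(V1, inter): …'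
def pvEmit (V1 : List String) (inter : PySem.Set String)
    (out : List (List String × List String)) : List (List String × List String) :=
  let cands := PySem.List.sorted inter (fun x => x) false
  (List.range' 1 cands.length 1).foldl (fun out s => pvPick V1 cands s [] out) out

-- 'def grow(rem, need, chosen, inter): …' — backtracking with threaded intersection
def pvGrow (T : PySem.Dict String (PySem.Set String)) (rem : List String) (need : Nat)
    (chosen : List String) (inter : PySem.Set String)
    (out : List (List String × List String)) : List (List String × List String) :=
  match need, rem with
  | 0, _ => pvEmit chosen inter out
  | _ + 1, [] => out                                    -- 'if len(rem) < need …: return'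
  | n + 1, v :: rest =>
    if (v :: rest).length < n + 1 || inter.isEmpty then out
    else pvGrow T rest (n + 1) chosen inter
           (pvGrow T rest n (chosen ++ [v]) (PySem.Set.inter inter (T.getD v [])) out)

def find_bcliques_alt (graph : List (String × List (String × List (String × Bool)))) : List (List String × List String) :=
  let g := PySem.Dict.ofList graph
  let nodes := pvNodes graph
  let T := pvT g
  (List.range' 1 nodes.length 1).foldl
    (fun out r => pvGrow T nodes r [] (PySem.Set.ofList nodes) out) []

-- ===== PRECONDITION & SPEC =====
def Spec_find_bcliques (graph : List (String × List (String × List (String × Bool)))) (out : List (List String × List String)) : Prop := out = find_bcliques_alt graph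
instance (graph : List (String × List (String × List (String × Bool)))) (out : List (List String × List String)) : Decidable (Spec_find_bcliques graph out) := by unfold Spec_find_bcliques; infer_instance

-- ===== CLAIM (what is proved, stated in full; the proofs are below) =====
def Claim_equal_find_bcliques : Prop := ∀ (graph : List (String × List (String × List (String × Bool)))), Dom_find_bcliques graph → Spec_find_bcliques graph (find_bcliques graph)

-- ===== LEMMAS AND PROOFS =====

theorem pvTargets_nil : pvTargets ([] : List (String × List (String × Bool))) = [] := rfl

-- T.get(v, set()) is exactly the target set of graph.get(v, {})
theorem pvT_getD (g : PySem.Dict String (List (String × List (String × Bool))))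
    (hg : g.keys.Nodup) (v : String) :
    (pvT g).getD v [] = pvTargets (g.getD v []) := by
  have hitems : (pvT g).items = g.items.map (fun p => (p.1, pvTargets p.2)) := by
    have := PySem.Dict.items_foldl_insert_fresh
      (l := g.items.map (fun p => (p.1, pvTargets p.2)))
      (k := Prod.fst) (v := Prod.snd) (d := PySem.Dict.empty)
      (by intro a _; exact PySem.Dict.contains_empty _)
      (by simpa [List.map_map, Function.comp_def, PySem.Dict.keys] using hg)
    simpa [pvT, PySem.Dict.ofList, PySem.Dict.update] using this
  have hfind : ((pvT g).items).find? (fun p => p.1 == v)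
      = Option.map (fun p => (p.1, pvTargets p.2)) (g.items.find? (fun p => p.1 == v)) := by
    rw [hitems, List.find?_map]
    rfl
  rw [PySem.Dict.getD, PySem.Dict.getD, PySem.Dict.get?, PySem.Dict.get?, hfind]
  cases g.items.find? (fun p => p.1 == v) with
  | none => simp [pvTargets_nil]
  | some p => simp

-- membership in a target set is A's edge test
theorem mem_pvTargets (g : PySem.Dict String (List (String × List (String × Bool))))
    (v1 v2 : String) :
    v2 ∈ pvTargets (g.getD v1 []) ↔ pvEdgeTest g v1 v2 = true := by
  unfold pvTargets pvEdgeTest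
  set d := PySem.Dict.ofList (g.getD v1 []) with hd
  have hnd : d.keys.Nodup := PySem.Dict.nodup_keys_ofList _
  rw [PySem.Set.mem_ofList]
  simp only [List.mem_map, List.mem_filter, Bool.and_eq_true]
  constructor
  · rintro ⟨p, ⟨hp, hq⟩, rfl⟩
    refine ⟨?_, ?_⟩
    · exact (PySem.Dict.contains_iff_mem_keys d p.1).mpr
        (by exact List.mem_map_of_mem hp)
    · have : d.getD p.1 [] = p.2 :=
        PySem.Dict.getD_of_mem_items d (k := p.1) (v := p.2) hp hnd []
      rw [this]; exact hq
  · rintro ⟨hc, hq⟩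
    have : v2 ∈ d.keys := (PySem.Dict.contains_iff_mem_keys d v2).mp hc
    rcases List.mem_map.mp this with ⟨p, hp, hfst⟩
    refine ⟨p, ⟨hp, ?_⟩, hfst⟩
    have : d.getD p.1 [] = p.2 :=
      PySem.Dict.getD_of_mem_items d (k := p.1) (v := p.2) hp hnd []
    rw [hfst] at this
    rw [this] at hq
    exact hq

-- the intersection B threads along a branch, as a fold
def pvFoldInter (T : PySem.Dict String (PySem.Set String)) (c : List String)
    (inter : PySem.Set String) : PySem.Set String :=
  c.foldl (fun s v => PySem.Set.inter s (T.getD v [])) inter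

theorem mem_pvFoldInter (T : PySem.Dict String (PySem.Set String)) (c : List String)
    (inter : PySem.Set String) (y : String) :
    y ∈ pvFoldInter T c inter ↔ y ∈ inter ∧ ∀ v ∈ c, y ∈ T.getD v [] := by
  unfold pvFoldInter
  induction c generalizing inter with
  | nil => simp
  | cons v t ih =>
    simp only [List.foldl_cons, ih, PySem.Set.mem_inter, List.mem_cons]
    constructor
    · rintro ⟨⟨hs, hv⟩, ht⟩
      exact ⟨hs, by rintro w (rfl | hw); exact hv; exact ht w hw⟩
    · rintro ⟨hs, h⟩
      exact ⟨⟨hs, h v (Or.inl rfl)⟩, fun w hw => h w (Or.inr hw)⟩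

theorem nodup_pvFoldInter (T : PySem.Dict String (PySem.Set String)) (c : List String)
    (inter : PySem.Set String) (hs : inter.Nodup) : (pvFoldInter T c inter).Nodup := by
  unfold pvFoldInter
  induction c generalizing inter with
  | nil => exact hs
  | cons v t ih => exact ih _ (PySem.Set.nodup_inter _ _ hs)

theorem pvFoldInter_nil_base (T : PySem.Dict String (PySem.Set String)) (c : List String) :
    pvFoldInter T c [] = [] := by
  unfold pvFoldInter
  induction c with
  | nil => rfl
  | cons v t ih => simpa [PySem.Set.inter] using ih

theorem pvEmit_nil (V1 : List String) (out : List (List String × List String)) :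
    pvEmit V1 [] out = out := rfl

theorem pvNodes_pairwise_lt (graph : List (String × List (String × List (String × Bool)))) :
    (pvNodes graph).Pairwise (· < ·) := by
  unfold pvNodes
  have hnd : (pvNodes graph).Nodup := by
    unfold pvNodes
    exact ((PySem.List.sorted_perm _ _ _).nodup_iff).mpr
      (PySem.Set.nodup_union _ _ (PySem.Set.nodup_ofList _))
  have hle := PySem.List.sorted_pairwise
    (xs := PySem.Set.union (PySem.Set.ofList (PySem.Dict.ofList graph).keys)
      ((PySem.Dict.ofList graph).values.flatMap (fun nbrs => (PySem.Dict.ofList nbrs).keys)))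
    (key := fun x : String => x)
  unfold pvNodes at hnd
  exact (hle.and hnd).imp (fun h => lt_of_le_of_ne h.1 h.2)

-- pvPick enumerates the combinations of rem in itertools (lex) order
theorem pvPick_eq (V1 : List String) (rem : List String) (need : Nat) (chosen : List String)
    (out : List (List String × List String)) :
    pvPick V1 rem need chosen out
      = (PySem.List.combinations rem need).foldl
          (fun out c => out ++ [(PySem.Set.ofList V1, PySem.Set.ofList (chosen ++ c))]) out := by
  induction rem generalizing need chosen out with
  | nil =>
    cases need with
    | zero => simp [pvPick, PySem.List.combinations_zero]
    | succ n => simp [pvPick, PySem.List.combinations_nil_succ]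
  | cons v rest ih =>
    cases need with
    | zero => simp [pvPick, PySem.List.combinations_zero]
    | succ n =>
      rw [pvPick]
      by_cases hlen : (v :: rest).length < n + 1
      · rw [if_pos hlen, PySem.List.combinations_eq_nil_of_length_lt _ hlen]
        rfl
      · rw [if_neg hlen, PySem.List.combinations_cons_succ, List.foldl_append,
            List.foldl_map, ih, ih]
        congr 1
        apply PySem.List.foldl_congr_mem
        intro acc c _
        simp

-- pvGrow enumerates the combinations of rem in itertools order, emitting each with
-- its accumulated intersection (pruned branches contribute nothing)
theorem pvGrow_eq (T : PySem.Dict String (PySem.Set String)) (rem : List String) (need : Nat)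
    (chosen : List String) (inter : PySem.Set String) (out : List (List String × List String)) :
    pvGrow T rem need chosen inter out
      = (PySem.List.combinations rem need).foldl
          (fun out c => pvEmit (chosen ++ c) (pvFoldInter T c inter) out) out := by
  induction rem generalizing need chosen inter out with
  | nil =>
    cases need with
    | zero => simp [pvGrow, PySem.List.combinations_zero, pvFoldInter]
    | succ n => simp [pvGrow, PySem.List.combinations_nil_succ]
  | cons v rest ih =>
    cases need with
    | zero => simp [pvGrow, PySem.List.combinations_zero, pvFoldInter]
    | succ n =>
      rw [pvGrow]
      by_cases hlen : (v :: rest).length < n + 1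
      · have hc : ((v :: rest).length < n + 1 || List.isEmpty inter) = true := by
          simp only [List.length_cons] at hlen
          simp
          exact Or.inl (by omega)
        rw [PySem.List.combinations_eq_nil_of_length_lt _ hlen, List.foldl_nil, if_pos hc]
      · by_cases hint : inter.isEmpty
        · rw [if_pos (by simp [hint])]
          have hnil : inter = [] := by
            cases inter with
            | nil => rfl
            | cons a t => simp [List.isEmpty] at hint
          subst hnil
          induction PySem.List.combinations (v :: rest) (n + 1) generalizing out with
          | nil => rfl
          | cons c cs ihc => simpa [pvFoldInter_nil_base, pvEmit_nil] using ihc out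
        · rw [if_neg (by simp only [List.length_cons] at hlen; simp [hint]; omega), PySem.List.combinations_cons_succ,
              List.foldl_append, List.foldl_map, ih, ih]
          congr 1
          apply PySem.List.foldl_congr_mem
          intro acc c _
          simp [pvFoldInter]

-- the per-branch candidate list of B equals A's filter
theorem candidates_eq (graph : List (String × List (String × List (String × Bool))))
    (c : List String) :
    PySem.List.sorted
        (pvFoldInter (pvT (PySem.Dict.ofList graph)) c
          (PySem.Set.ofList (pvNodes graph))) (fun x => x) false
      = (pvNodes graph).filter
          (fun v2 => (PySem.Set.ofList c).all
            (fun v1 => pvEdgeTest (PySem.Dict.ofList graph) v1 v2)) := by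
  set g := PySem.Dict.ofList graph with hgdef
  have hgnd : g.keys.Nodup := PySem.Dict.nodup_keys_ofList _
  have hT : ∀ w : String, (pvT g).getD w [] = pvTargets (g.getD w []) :=
    fun w => pvT_getD g hgnd w
  have hcn : (pvFoldInter (pvT g) c (PySem.Set.ofList (pvNodes graph))).Nodup :=
    nodup_pvFoldInter _ _ _ (PySem.Set.nodup_ofList _)
  have hnlt := pvNodes_pairwise_lt graph
  have hnnd : (pvNodes graph).Nodup := hnlt.imp (fun h => ne_of_lt h)
  apply PySem.List.sorted_eq_of_perm_of_pairwise_lt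
  · rw [List.perm_ext_iff_of_nodup (hnnd.filter _) hcn]
    intro a
    rw [List.mem_filter, mem_pvFoldInter]
    simp only [hT, mem_pvTargets, PySem.Set.mem_ofList]
    constructor
    · rintro ⟨hn, hall⟩
      refine ⟨hn, fun v hv => ?_⟩
      exact List.all_eq_true.mp hall v (by rw [PySem.Set.mem_ofList]; exact hv)
    · rintro ⟨hn, h⟩
      refine ⟨hn, ?_⟩
      rw [List.all_eq_true]
      intro w hw
      rw [PySem.Set.mem_ofList] at hw
      exact h w hw
  · exact hnlt.filter _

-- ===== VERDICT (by name: the statement is the Claim_ definition above) =====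
theorem find_bcliques_spec : Claim_equal_find_bcliques := by
  intro graph _
  unfold Spec_find_bcliques find_bcliques find_bcliques_alt
  simp only []
  apply PySem.List.foldl_congr_mem
  intro acc r _
  rw [pvGrow_eq]
  apply PySem.List.foldl_congr_mem
  intro acc' c _
  rw [pvEmit]
  simp only [List.nil_append]
  rw [candidates_eq]
  apply PySem.List.foldl_congr_mem
  intro acc'' s _
  rw [pvPick_eq]
  simp only [List.nil_append]
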